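-- pv_equiv track=rewrite | github.com/ca1773130n/HarnessSync | src/config_health.py | format_pre_sync_warnings
-- ===== SOURCE A (Python) =====
-- def format_pre_sync_warnings(warnings: list[dict]) -> str:
--     """Format pre-sync gap warnings as human-readable text.
--
--     Args:
--         warnings: Output of pre_sync_gap_warnings().
--
--     Returns:
--         Formatted string, or empty string if no warnings.
--     """
--     if not warnings:
--         return ""
--
--     errors = [w for w in warnings if w["severity"] == "error"]
--     warns = [w for w in warnings if w["severity"] == "warn"]
--     infos = [w for w in warnings if w["severity"] == "info"]
--
--     lines = ["Pre-Sync Capability Gap Warnings", "=" * 50, ""]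
--
--     for w in errors:
--         lines.append(f"  ✗ [{w['target'].upper()}] {w['setting']}: {w['message']}")
--         lines.append(f"    → {w['suggestion']}")
--         lines.append("")
--
--     for w in warns:
--         lines.append(f"  ⚠ [{w['target'].upper()}] {w['setting']}: {w['message']}")
--         lines.append(f"    → {w['suggestion']}")
--         lines.append("")
--
--     for w in infos:
--         lines.append(f"  ℹ [{w['target'].upper()}] {w['setting']}: {w['message']}")
--         lines.append(f"    → {w['suggestion']}")
--         lines.append("")
--
--     summary_parts = []
--     if errors:
--         summary_parts.append(f"{len(errors)} error(s)")
--     if warns: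
--         summary_parts.append(f"{len(warns)} warning(s)")
--     if infos:
--         summary_parts.append(f"{len(infos)} info(s)")
--
--     lines.append("Summary: " + ", ".join(summary_parts))
--     if errors:
--         lines.append("Errors indicate settings that will be silently dropped — review before syncing.")
--
--     return "\n".join(lines)
-- ===== SOURCE B (Python) =====
-- def format_pre_sync_warnings(warnings: list[dict]) -> str:
--     """Format pre-sync gap warnings as human-readable text.
--
--     Sort-then-scan: stable-sort the known-severity warnings by severity rank,
--     emit all detail blocks in one loop with a symbol lookup, and count
--     severities in one tallying pass for the summary.
--     """
--     if not warnings: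
--         return ""
--
--     rank = {"error": 0, "warn": 1, "info": 2}
--     symbol = {"error": "✗", "warn": "⚠", "info": "ℹ"}
--     known = [w for w in warnings if w["severity"] in rank]
--     ordered = sorted(known, key=lambda w: rank[w["severity"]])
--
--     lines = ["Pre-Sync Capability Gap Warnings", "=" * 50, ""]
--     for w in ordered:
--         lines.append(f"  {symbol[w['severity']]} [{w['target'].upper()}] {w['setting']}: {w['message']}")
--         lines.append(f"    → {w['suggestion']}")
--         lines.append("")
--
--     counts = [0, 0, 0]
--     for w in known:
--         counts[rank[w["severity"]]] += 1
--
--     nouns = ["error(s)", "warning(s)", "info(s)"]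
--     lines.append("Summary: " + ", ".join(
--         f"{c} {n}" for c, n in zip(counts, nouns) if c))
--     if counts[0]:
--         lines.append("Errors indicate settings that will be silently dropped — review before syncing.")
--
--     return "\n".join(lines)
-- ===== Notes on version B (the rewrite author's own statement) =====
-- stated objective: alternative
-- what changed: Replaces A's three severity-filter passes and three duplicated emit loops with a stable sort of the known-severity warnings by a severity rank, one emit loop with a symbol lookup over the sorted list, and one tallying pass producing the three counts for the summary.
import Mathlib
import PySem

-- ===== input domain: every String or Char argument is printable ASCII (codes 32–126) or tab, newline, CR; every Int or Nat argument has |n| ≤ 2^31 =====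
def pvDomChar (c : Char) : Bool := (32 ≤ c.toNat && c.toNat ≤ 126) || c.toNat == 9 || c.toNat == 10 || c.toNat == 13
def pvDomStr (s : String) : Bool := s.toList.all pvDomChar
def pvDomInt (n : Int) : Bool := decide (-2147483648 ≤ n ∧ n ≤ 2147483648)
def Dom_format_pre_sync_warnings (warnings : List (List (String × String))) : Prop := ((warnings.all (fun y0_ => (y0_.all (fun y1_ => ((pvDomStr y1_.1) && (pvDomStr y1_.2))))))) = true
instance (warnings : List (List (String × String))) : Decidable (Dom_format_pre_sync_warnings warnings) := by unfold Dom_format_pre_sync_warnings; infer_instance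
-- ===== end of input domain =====

-- B stable-sorts the known-severity warnings by a severity rank and emits everything in one
-- loop with a symbol lookup, tallying the summary counts in one pass (objective: alternative).

-- w[k] for a Python dict (first match in the association list); Pre_ guarantees the key is
-- present wherever either program reads it — Python raises KeyError on a missing key.
def pvItem (w : List (String × String)) (k : String) : String := (List.lookup k w).getD ""

-- ===== PORT A =====
def format_pre_sync_warnings (warnings : List (List (String × String))) : String :=
  if warnings = [] then ""
  else
    let errors := warnings.filter (fun w => pvItem w "severity" == "error")
    let warns  := warnings.filter (fun w => pvItem w "severity" == "warn")
    let infos  := warnings.filter (fun w => pvItem w "severity" == "info")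
    let lines : List String := ["Pre-Sync Capability Gap Warnings", "==================================================", ""]
    let lines := errors.foldl (fun acc w =>
      acc ++ ["  ✗ [" ++ PySem.Str.upper (pvItem w "target") ++ "] " ++ pvItem w "setting" ++ ": " ++ pvItem w "message",
              "    → " ++ pvItem w "suggestion", ""]) lines
    let lines := warns.foldl (fun acc w =>
      acc ++ ["  ⚠ [" ++ PySem.Str.upper (pvItem w "target") ++ "] " ++ pvItem w "setting" ++ ": " ++ pvItem w "message",
              "    → " ++ pvItem w "suggestion", ""]) lines
    let lines := infos.foldl (fun acc w =>
      acc ++ ["  ℹ [" ++ PySem.Str.upper (pvItem w "target") ++ "] " ++ pvItem w "setting" ++ ": " ++ pvItem w "message",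
              "    → " ++ pvItem w "suggestion", ""]) lines
    let summaryParts : List String := []
    let summaryParts := if errors ≠ [] then summaryParts ++ [PySem.Int.toStr (errors.length : Int) ++ " error(s)"] else summaryParts
    let summaryParts := if warns ≠ [] then summaryParts ++ [PySem.Int.toStr (warns.length : Int) ++ " warning(s)"] else summaryParts
    let summaryParts := if infos ≠ [] then summaryParts ++ [PySem.Int.toStr (infos.length : Int) ++ " info(s)"] else summaryParts
    let lines := lines ++ ["Summary: " ++ PySem.Str.join ", " summaryParts]
    let lines := if errors ≠ [] then lines ++ ["Errors indicate settings that will be silently dropped — review before syncing."] else lines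
    PySem.Str.join "\n" lines

-- ===== PORT B =====
-- the `rank` and `symbol` dicts of Source B
def pvRankDict : List (String × Int) := [("error", 0), ("warn", 1), ("info", 2)]
def pvSymDict : List (String × String) := [("error", "✗"), ("warn", "⚠"), ("info", "ℹ")]
-- rank[w["severity"]] (Source B only evaluates it when the key is present)
def pvRank (w : List (String × String)) : Int := (List.lookup (pvItem w "severity") pvRankDict).getD 0
-- counts[rank[w["severity"]]] += 1 for one w, on the counts triple
def pvTally (c : Int × Int × Int) (w : List (String × String)) : Int × Int × Int :=
  if pvRank w = 0 then (c.1 + 1, c.2.1, c.2.2)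
  else if pvRank w = 1 then (c.1, c.2.1 + 1, c.2.2)
  else (c.1, c.2.1, c.2.2 + 1)

def format_pre_sync_warnings_alt (warnings : List (List (String × String))) : String :=
  if warnings = [] then ""
  else
    let known := warnings.filter (fun w => (List.lookup (pvItem w "severity") pvRankDict).isSome)
    let ordered := PySem.List.sorted known pvRank
    let lines : List String := ["Pre-Sync Capability Gap Warnings", "==================================================", ""]
    let lines := ordered.foldl (fun acc w =>
      acc ++ ["  " ++ (List.lookup (pvItem w "severity") pvSymDict).getD "" ++ " [" ++ PySem.Str.upper (pvItem w "target") ++ "] " ++ pvItem w "setting" ++ ": " ++ pvItem w "message",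
              "    → " ++ pvItem w "suggestion", ""]) lines
    let counts := known.foldl pvTally (0, 0, 0)
    let nouns : List String := ["error(s)", "warning(s)", "info(s)"]
    let parts := (((List.zip [counts.1, counts.2.1, counts.2.2] nouns).filter (fun p => p.1 ≠ 0)).map
      (fun p => PySem.Int.toStr p.1 ++ " " ++ p.2))
    let lines := lines ++ ["Summary: " ++ PySem.Str.join ", " parts]
    let lines := if counts.1 ≠ 0 then lines ++ ["Errors indicate settings that will be silently dropped — review before syncing."] else lines
    PySem.Str.join "\n" lines

-- ===== PRECONDITION & SPEC =====
-- Pre_ excludes exactly the inputs on which Python A raises KeyError: a warning without a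
-- "severity" key, or a warning with severity error/warn/info missing one of the keys
-- target/setting/message/suggestion that the detail lines read.
def Pre_format_pre_sync_warnings (warnings : List (List (String × String))) : Prop :=
  (warnings.all (fun w =>
    (List.lookup "severity" w).isSome &&
    (let s := (List.lookup "severity" w).getD ""
     !(s == "error" || s == "warn" || s == "info") ||
     (["target", "setting", "message", "suggestion"].all (fun k => (List.lookup k w).isSome))))) = true
instance (warnings : List (List (String × String))) : Decidable (Pre_format_pre_sync_warnings warnings) := by
  unfold Pre_format_pre_sync_warnings; infer_instance

def pvWitness_format_pre_sync_warnings : (List (List (String × String))) :=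
  [[("severity", "error"), ("target", "hs"), ("setting", "model"), ("message", "gap"), ("suggestion", "fix")]]

def Spec_format_pre_sync_warnings (warnings : List (List (String × String))) (out : String) : Prop := out = format_pre_sync_warnings_alt warnings
instance (warnings : List (List (String × String))) (out : String) : Decidable (Spec_format_pre_sync_warnings warnings out) := by unfold Spec_format_pre_sync_warnings; infer_instance

-- ===== CLAIM =====
def Claim_equal_format_pre_sync_warnings : Prop := ∀ (warnings : List (List (String × String))), Dom_format_pre_sync_warnings warnings → Pre_format_pre_sync_warnings warnings → Spec_format_pre_sync_warnings warnings (format_pre_sync_warnings warnings)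

-- ===== LEMMAS AND PROOFS =====
-- cons/nil equations of PySem's insertion (hold by rfl; stated once, used below)
theorem pv_insertBy_cons {α : Type} (bef : α → α → Bool) (x y : α) (ys : List α) :
    PySem.List.insertBy bef x (y :: ys) =
      if bef x y then x :: y :: ys else y :: PySem.List.insertBy bef x ys := rfl

-- x is inserted at the front when it comes before everything
theorem pv_insertBy_front {α : Type} (bef : α → α → Bool) (x : α) (ys : List α)
    (h : ∀ y ∈ ys, bef x y = true) : PySem.List.insertBy bef x ys = x :: ys := by
  cases ys with
  | nil => rfl
  | cons y ys => rw [pv_insertBy_cons, if_pos (h y (by simp))]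

-- insertion walks past a prefix it does not come before
theorem pv_insertBy_append {α : Type} (bef : α → α → Bool) (x : α) (A t : List α)
    (h : ∀ a ∈ A, bef x a = false) :
    PySem.List.insertBy bef x (A ++ t) = A ++ PySem.List.insertBy bef x t := by
  induction A with
  | nil => rfl
  | cons a A ih =>
    rw [List.cons_append, pv_insertBy_cons, if_neg (by simp [h a (by simp)]),
      ih (fun a ha => h a (by simp [ha]))]
    simp

theorem pv_forall_append_singleton {α : Type} (P : α → Prop) (A : List α) (x : α)
    (hA : ∀ a ∈ A, P a) (hx : P x) : ∀ a ∈ A ++ [x], P a := by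
  intro a ha
  rcases List.mem_append.1 ha with h | h
  · exact hA a h
  · simp at h; simpa [h] using hx

def pvBef (a b : List (String × String)) : Bool := decide (pvRank a < pvRank b)

-- the invariant of B's insertion sort: it partitions by rank, stably
theorem pv_sort_inv (rest A B C : List (List (String × String)))
    (hA : ∀ a ∈ A, pvRank a = 0) (hB : ∀ b ∈ B, pvRank b = 1) (hC : ∀ c ∈ C, pvRank c = 2)
    (hr : ∀ x ∈ rest, pvRank x = 0 ∨ pvRank x = 1 ∨ pvRank x = 2) :
    rest.foldl (fun acc x => PySem.List.insertBy pvBef x acc) (A ++ (B ++ C)) =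
      (A ++ rest.filter (fun x => pvRank x == 0)) ++
      ((B ++ rest.filter (fun x => pvRank x == 1)) ++
       (C ++ rest.filter (fun x => pvRank x == 2))) := by
  induction rest generalizing A B C with
  | nil => simp
  | cons x rest ih =>
    have hx := hr x (by simp)
    have hrest : ∀ y ∈ rest, pvRank y = 0 ∨ pvRank y = 1 ∨ pvRank y = 2 :=
      fun y hy => hr y (by simp [hy])
    rcases hx with h0 | h1 | h2
    · have : PySem.List.insertBy pvBef x (A ++ (B ++ C)) = (A ++ [x]) ++ (B ++ C) := by
        rw [pv_insertBy_append pvBef x A _ (fun a ha => by simp [pvBef, hA a ha, h0]),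
          pv_insertBy_front pvBef x _ (fun y hy => by
            rcases List.mem_append.1 hy with hb | hc
            · simp [pvBef, hB y hb, h0]
            · simp [pvBef, hC y hc, h0])]
        simp
      rw [List.foldl_cons, this,
        ih (A ++ [x]) B C (pv_forall_append_singleton _ A x hA (by simp [h0])) hB hC hrest]
      simp [h0]
    · have : PySem.List.insertBy pvBef x (A ++ (B ++ C)) = A ++ ((B ++ [x]) ++ C) := by
        rw [pv_insertBy_append pvBef x A _ (fun a ha => by simp [pvBef, hA a ha, h1]),
          pv_insertBy_append pvBef x B _ (fun b hb => by simp [pvBef, hB b hb, h1]),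
          pv_insertBy_front pvBef x _ (fun y hy => by simp [pvBef, hC y hy, h1])]
        simp
      rw [List.foldl_cons, this,
        ih A (B ++ [x]) C hA (pv_forall_append_singleton _ B x hB (by simp [h1])) hC hrest]
      simp [h1]
    · have : PySem.List.insertBy pvBef x (A ++ (B ++ C)) = A ++ (B ++ (C ++ [x])) := by
        rw [PySem.List.insertBy_of_forall_not_before pvBef x _ (fun y hy => by
          rcases List.mem_append.1 hy with ha | hy
          · simp [pvBef, hA y ha, h2]
          · rcases List.mem_append.1 hy with hb | hc
            · simp [pvBef, hB y hb, h2]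
            · simp [pvBef, hC y hc, h2])]
        simp
      rw [List.foldl_cons, this,
        ih A B (C ++ [x]) hA hB (pv_forall_append_singleton _ C x hC (by simp [h2])) hrest]
      simp [h2]

-- membership in the rank dict characterised per severity string
theorem pv_beq_false (s t : String) (h : ¬ s = t) : (s == t) = false := by
  simpa [beq_iff_eq] using h

theorem pv_lookup_isSome (s : String) :
    (List.lookup s pvRankDict).isSome = (s == "error" || s == "warn" || s == "info") := by
  by_cases h1 : s = "error" <;> by_cases h2 : s = "warn" <;> by_cases h3 : s = "info" <;>
    simp [pvRankDict, List.lookup, pv_beq_false, h1, h2, h3]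

theorem pv_rank_cases (s : String) (h : (List.lookup s pvRankDict).isSome = true) :
    (List.lookup s pvRankDict).getD 0 = 0 ∨ (List.lookup s pvRankDict).getD 0 = 1 ∨
    (List.lookup s pvRankDict).getD 0 = 2 := by
  by_cases h1 : s = "error"
  · left; simp [pvRankDict, h1]
  · by_cases h2 : s = "warn"
    · right; left; simp [pvRankDict, List.lookup, pv_beq_false, h2]
    · by_cases h3 : s = "info"
      · right; right; simp [pvRankDict, List.lookup, pv_beq_false, h3]
      · rw [pv_lookup_isSome] at h; simp [pv_beq_false, h1, h2, h3] at h

theorem pv_known_and_rank0 (s : String) :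
    ((List.lookup s pvRankDict).isSome && ((List.lookup s pvRankDict).getD 0 == 0)) = (s == "error") := by
  by_cases h1 : s = "error" <;> by_cases h2 : s = "warn" <;> by_cases h3 : s = "info" <;>
    simp [pvRankDict, List.lookup, pv_beq_false, h1, h2, h3]

theorem pv_known_and_rank1 (s : String) :
    ((List.lookup s pvRankDict).isSome && ((List.lookup s pvRankDict).getD 0 == 1)) = (s == "warn") := by
  by_cases h1 : s = "error" <;> by_cases h2 : s = "warn" <;> by_cases h3 : s = "info" <;>
    simp [pvRankDict, List.lookup, pv_beq_false, h1, h2, h3]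

theorem pv_known_and_rank2 (s : String) :
    ((List.lookup s pvRankDict).isSome && ((List.lookup s pvRankDict).getD 0 == 2)) = (s == "info") := by
  by_cases h1 : s = "error" <;> by_cases h2 : s = "warn" <;> by_cases h3 : s = "info" <;>
    simp [pvRankDict, List.lookup, pv_beq_false, h1, h2, h3]

theorem pv_sym_error (s : String) (h : s = "error") : (List.lookup s pvSymDict).getD "" = "✗" := by
  simp [pvSymDict, h]
theorem pv_sym_warn (s : String) (h : s = "warn") : (List.lookup s pvSymDict).getD "" = "⚠" := by
  simp [pvSymDict, List.lookup, pv_beq_false, h]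
theorem pv_sym_info (s : String) (h : s = "info") : (List.lookup s pvSymDict).getD "" = "ℹ" := by
  simp [pvSymDict, List.lookup, pv_beq_false, h]

-- B's tallying pass counts exactly the three rank-filtered lengths
theorem pv_tally_inv (rest : List (List (String × String))) (a b c : Int)
    (hr : ∀ x ∈ rest, pvRank x = 0 ∨ pvRank x = 1 ∨ pvRank x = 2) :
    rest.foldl pvTally (a, b, c) =
      (a + ((rest.filter (fun x => pvRank x == 0)).length : Int),
       b + ((rest.filter (fun x => pvRank x == 1)).length : Int),
       c + ((rest.filter (fun x => pvRank x == 2)).length : Int)) := by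
  induction rest generalizing a b c with
  | nil => simp
  | cons x rest ih =>
    have hrest : ∀ y ∈ rest, pvRank y = 0 ∨ pvRank y = 1 ∨ pvRank y = 2 :=
      fun y hy => hr y (by simp [hy])
    rcases hr x (by simp) with h | h | h <;>
      simp only [List.foldl_cons, pvTally, h, List.filter_cons] <;>
      · rw [ih _ _ _ hrest]
        simp [Prod.ext_iff]
        omega

theorem pvLit4 (s : String) : s ++ " " ++ "error(s)" = s ++ " error(s)" := by
  rw [String.append_assoc]; rfl
theorem pvLit5 (s : String) : s ++ " " ++ "warning(s)" = s ++ " warning(s)" := by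
  rw [String.append_assoc]; rfl
theorem pvLit6 (s : String) : s ++ " " ++ "info(s)" = s ++ " info(s)" := by
  rw [String.append_assoc]; rfl

-- literal-concatenation facts used when collapsing B's symbol lookup into A's literals
theorem pvLitE : ("  " : String) ++ "✗" = "  ✗" := rfl
theorem pvLitE2 : ("  ✗" : String) ++ " [" = "  ✗ [" := rfl
theorem pvLitW : ("  " : String) ++ "⚠" = "  ⚠" := rfl
theorem pvLitW2 : ("  ⚠" : String) ++ " [" = "  ⚠ [" := rfl
theorem pvLitI : ("  " : String) ++ "ℹ" = "  ℹ" := rfl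
theorem pvLitI2 : ("  ℹ" : String) ++ " [" = "  ℹ [" := rfl

-- ===== VERDICT =====
theorem format_pre_sync_warnings_spec : Claim_equal_format_pre_sync_warnings := by
  intro ws _ hpre
  unfold Spec_format_pre_sync_warnings format_pre_sync_warnings format_pre_sync_warnings_alt
  by_cases h : ws = []
  · simp [h]
  · rw [if_neg h, if_neg h]
    simp only []
    have hK : ∀ x ∈ ws.filter (fun w => (List.lookup (pvItem w "severity") pvRankDict).isSome),
        pvRank x = 0 ∨ pvRank x = 1 ∨ pvRank x = 2 := by
      intro x hx
      exact pv_rank_cases _ (by simpa using (List.mem_filter.1 hx).2)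
    have f0 : (ws.filter (fun w => (List.lookup (pvItem w "severity") pvRankDict).isSome)).filter
        (fun x => pvRank x == 0) = ws.filter (fun w => pvItem w "severity" == "error") := by
      rw [List.filter_filter]
      exact List.filter_congr (fun w _ => by
        simpa [pvRank, Bool.and_comm] using pv_known_and_rank0 (pvItem w "severity"))
    have f1 : (ws.filter (fun w => (List.lookup (pvItem w "severity") pvRankDict).isSome)).filter
        (fun x => pvRank x == 1) = ws.filter (fun w => pvItem w "severity" == "warn") := by
      rw [List.filter_filter]
      exact List.filter_congr (fun w _ => by
        simpa [pvRank, Bool.and_comm] using pv_known_and_rank1 (pvItem w "severity"))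
    have f2 : (ws.filter (fun w => (List.lookup (pvItem w "severity") pvRankDict).isSome)).filter
        (fun x => pvRank x == 2) = ws.filter (fun w => pvItem w "severity" == "info") := by
      rw [List.filter_filter]
      exact List.filter_congr (fun w _ => by
        simpa [pvRank, Bool.and_comm] using pv_known_and_rank2 (pvItem w "severity"))
    have hsort : PySem.List.sorted
        (ws.filter (fun w => (List.lookup (pvItem w "severity") pvRankDict).isSome)) pvRank
        = ws.filter (fun w => pvItem w "severity" == "error") ++
          (ws.filter (fun w => pvItem w "severity" == "warn") ++
           ws.filter (fun w => pvItem w "severity" == "info")) := by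
      rw [PySem.List.sorted_eq_foldl_insertBy]
      have hb : (fun (acc : List (List (String × String))) x =>
          PySem.List.insertBy (fun a b => decide (pvRank a < pvRank b)) x acc)
          = fun acc x => PySem.List.insertBy pvBef x acc := rfl
      rw [hb]
      have hinv := pv_sort_inv
        (ws.filter (fun w => (List.lookup (pvItem w "severity") pvRankDict).isSome))
        [] [] [] (by simp) (by simp) (by simp) hK
      simpa [f0, f1, f2] using hinv
    have hcount : (ws.filter (fun w => (List.lookup (pvItem w "severity") pvRankDict).isSome)).foldl
        pvTally (0, 0, 0) =
        (((ws.filter (fun w => pvItem w "severity" == "error")).length : Int),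
         ((ws.filter (fun w => pvItem w "severity" == "warn")).length : Int),
         ((ws.filter (fun w => pvItem w "severity" == "info")).length : Int)) := by
      rw [pv_tally_inv _ 0 0 0 hK, f0, f1, f2]; simp
    have hfE : ∀ (init : List String), List.foldl
        (fun acc w => acc ++ ["  " ++ (List.lookup (pvItem w "severity") pvSymDict).getD "" ++ " [" ++ PySem.Str.upper (pvItem w "target") ++ "] " ++ pvItem w "setting" ++ ": " ++ pvItem w "message", "    → " ++ pvItem w "suggestion", ""])
        init (ws.filter (fun w => pvItem w "severity" == "error")) = List.foldl
        (fun acc w => acc ++ ["  ✗ [" ++ PySem.Str.upper (pvItem w "target") ++ "] " ++ pvItem w "setting" ++ ": " ++ pvItem w "message", "    → " ++ pvItem w "suggestion", ""])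
        init (ws.filter (fun w => pvItem w "severity" == "error")) := by
      intro init
      refine PySem.List.foldl_congr_mem _ _ _ _ ?_
      intro acc w hw
      have hs : pvItem w "severity" = "error" := by
        simpa [beq_iff_eq] using (List.mem_filter.1 hw).2
      rw [pv_sym_error _ hs, pvLitE, pvLitE2]
    have hfW : ∀ (init : List String), List.foldl
        (fun acc w => acc ++ ["  " ++ (List.lookup (pvItem w "severity") pvSymDict).getD "" ++ " [" ++ PySem.Str.upper (pvItem w "target") ++ "] " ++ pvItem w "setting" ++ ": " ++ pvItem w "message", "    → " ++ pvItem w "suggestion", ""])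
        init (ws.filter (fun w => pvItem w "severity" == "warn")) = List.foldl
        (fun acc w => acc ++ ["  ⚠ [" ++ PySem.Str.upper (pvItem w "target") ++ "] " ++ pvItem w "setting" ++ ": " ++ pvItem w "message", "    → " ++ pvItem w "suggestion", ""])
        init (ws.filter (fun w => pvItem w "severity" == "warn")) := by
      intro init
      refine PySem.List.foldl_congr_mem _ _ _ _ ?_
      intro acc w hw
      have hs : pvItem w "severity" = "warn" := by
        simpa [beq_iff_eq] using (List.mem_filter.1 hw).2
      rw [pv_sym_warn _ hs, pvLitW, pvLitW2]
    have hfI : ∀ (init : List String), List.foldl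
        (fun acc w => acc ++ ["  " ++ (List.lookup (pvItem w "severity") pvSymDict).getD "" ++ " [" ++ PySem.Str.upper (pvItem w "target") ++ "] " ++ pvItem w "setting" ++ ": " ++ pvItem w "message", "    → " ++ pvItem w "suggestion", ""])
        init (ws.filter (fun w => pvItem w "severity" == "info")) = List.foldl
        (fun acc w => acc ++ ["  ℹ [" ++ PySem.Str.upper (pvItem w "target") ++ "] " ++ pvItem w "setting" ++ ": " ++ pvItem w "message", "    → " ++ pvItem w "suggestion", ""])
        init (ws.filter (fun w => pvItem w "severity" == "info")) := by
      intro init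
      refine PySem.List.foldl_congr_mem _ _ _ _ ?_
      intro acc w hw
      have hs : pvItem w "severity" = "info" := by
        simpa [beq_iff_eq] using (List.mem_filter.1 hw).2
      rw [pv_sym_info _ hs, pvLitI, pvLitI2]
    rw [hsort, hcount, List.foldl_append, List.foldl_append, hfE, hfW, hfI]
    by_cases hE : ws.filter (fun w => pvItem w "severity" == "error") = [] <;>
    by_cases hW : ws.filter (fun w => pvItem w "severity" == "warn") = [] <;>
    by_cases hI : ws.filter (fun w => pvItem w "severity" == "info") = [] <;>
      simp [hE, hW, hI, List.length_eq_zero_iff, pvLit4, pvLit5, pvLit6]
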